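-- pv_equiv track=rewrite | github.com/MEngMihailTodorov/Softuni_courses | Softuni_Advanced_2022/Advanced/OOP_Advanced/01_First_Steps_in_OOP/01_Rhombus_of_Stars.py | star_rhombus
-- ===== SOURCE A (Python) =====
-- def star_rhombus(n):
--     output = ''
--     for row in range(1, n + 1):
--         output += ' ' * (n - row)
--         for col in range(1, row + 1):
--             output += "* "
--         output += "\n"
--
--     for row in range(n - 1, 0, -1):
--         output += ' ' * (n - row)
--         for col in range(row + 1, 1, -1):
--             output += "* "
--         output += "\n"
--
--     return output
-- ===== SOURCE B (Python) =====
-- def star_rhombus(n):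
--     return ''.join(
--         ' ' * (n - w) + '* ' * w + '\n'
--         for w in (n - abs(n - 1 - i) for i in range(2 * n - 1))
--     )
-- ===== Notes on version B (the rewrite author's own statement) =====
-- stated objective: simpler
-- what changed: Replaces A's two counting loops (up-rows then down-rows, each with an inner star loop) by a single pass over all 2n-1 rows whose star count comes from the mirror formula w = n - abs(n-1-i), joined into one string.
import Mathlib
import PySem

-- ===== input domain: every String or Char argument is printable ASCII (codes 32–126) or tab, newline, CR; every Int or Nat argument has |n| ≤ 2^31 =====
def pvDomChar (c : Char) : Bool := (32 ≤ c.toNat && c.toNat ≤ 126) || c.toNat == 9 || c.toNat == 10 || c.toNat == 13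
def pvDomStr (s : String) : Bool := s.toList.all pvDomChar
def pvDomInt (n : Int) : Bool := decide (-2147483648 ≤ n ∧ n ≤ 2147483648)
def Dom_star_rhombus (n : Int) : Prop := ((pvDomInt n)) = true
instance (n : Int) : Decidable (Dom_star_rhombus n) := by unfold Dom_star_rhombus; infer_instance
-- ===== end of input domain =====

-- B replaces A's two counting loops by one pass over all 2n-1 rows with the mirror
-- width formula w = n - |n-1-i| (objective: simpler).

-- ===== PORT A =====
-- literal port of A: two row loops (up then down), inner loops appending "* "
def star_rhombus (n : Int) : String :=
  let out : List Char :=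
    (PySem.List.pyRange 1 (n + 1) 1).foldl (fun out row =>
      ((PySem.List.pyRange 1 (row + 1) 1).foldl (fun o _ => o ++ ['*', ' '])
        (out ++ PySem.List.pyRepeat [' '] (n - row))) ++ ['\n']) []
  let out :=
    (PySem.List.pyRange (n - 1) 0 (-1)).foldl (fun out row =>
      ((PySem.List.pyRange (row + 1) 1 (-1)).foldl (fun o _ => o ++ ['*', ' '])
        (out ++ PySem.List.pyRepeat [' '] (n - row))) ++ ['\n']) out
  String.ofList out

-- ===== PORT B =====
-- literal port of Source B: ''.join over one range, width w = n - abs(n-1-i)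
def star_rhombus_alt (n : Int) : String :=
  String.ofList
    (((PySem.List.pyRange 0 (2 * n - 1) 1).map (fun i =>
        let w := n - |n - 1 - i|
        PySem.List.pyRepeat [' '] (n - w) ++ PySem.List.pyRepeat ['*', ' '] w ++ ['\n'])).flatten)

-- ===== PRECONDITION & SPEC =====
def Spec_star_rhombus (n : Int) (out : String) : Prop := out = star_rhombus_alt n
instance (n : Int) (out : String) : Decidable (Spec_star_rhombus n out) := by unfold Spec_star_rhombus; infer_instance

-- ===== CLAIM (what is proved, stated in full; the proofs are below) =====
def Claim_equal_star_rhombus : Prop := ∀ (n : Int), Dom_star_rhombus n → Spec_star_rhombus n (star_rhombus n)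

-- ===== LEMMAS AND PROOFS =====

-- one output line of width r in a rhombus of size n
def rhLine (n r : Int) : List Char :=
  PySem.List.pyRepeat [' '] (n - r) ++ PySem.List.pyRepeat ['*', ' '] r ++ ['\n']

-- A's inner loop appends "* " once per element of the range it iterates
theorem inner_fold (l : List Int) (o : List Char) :
    l.foldl (fun o _ => o ++ ['*', ' ']) o = o ++ PySem.List.pyRepeat ['*', ' '] (l.length : Int) := by
  induction l generalizing o with
  | nil => simp [PySem.List.pyRepeat]
  | cons x xs ih =>
      rw [List.foldl_cons, ih]
      simp [PySem.List.pyRepeat, List.replicate_succ]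

theorem star_rhombus_chars (n : Int) :
    star_rhombus n =
      String.ofList ((PySem.List.pyRange 1 (n + 1) 1 ++ PySem.List.pyRange (n - 1) 0 (-1)).flatMap (rhLine n)) := by
  unfold star_rhombus
  have hf : (fun (out : List Char) (row : Int) =>
      ((PySem.List.pyRange 1 (row + 1) 1).foldl (fun o _ => o ++ ['*', ' '])
        (out ++ PySem.List.pyRepeat [' '] (n - row))) ++ ['\n'])
      = fun out row => out ++ rhLine n row := by
    funext out row
    rw [inner_fold]
    rw [PySem.List.length_pyRange_one]
    have h : (max row 0).toNat = row.toNat := by omega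
    simp [rhLine, PySem.List.pyRepeat, h]
  have hg : (fun (out : List Char) (row : Int) =>
      ((PySem.List.pyRange (row + 1) 1 (-1)).foldl (fun o _ => o ++ ['*', ' '])
        (out ++ PySem.List.pyRepeat [' '] (n - row))) ++ ['\n'])
      = fun out row => out ++ rhLine n row := by
    funext out row
    rw [inner_fold]
    rw [PySem.List.length_pyRange_neg_one]
    have h : (max row 0).toNat = row.toNat := by omega
    simp [rhLine, PySem.List.pyRepeat, h]
  rw [hf, hg]
  simp only [PySem.List.foldl_append_eq_flatMap, List.flatMap_append, List.nil_append]

-- the single-pass widths are exactly A's up-then-down row counts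
theorem widths_eq (n : Int) :
    (PySem.List.pyRange 0 (2 * n - 1) 1).map (fun i => n - |n - 1 - i|)
      = PySem.List.pyRange 1 (n + 1) 1 ++ PySem.List.pyRange (n - 1) 0 (-1) := by
  apply List.ext_getElem
  · simp [PySem.List.length_pyRange_one, PySem.List.length_pyRange_neg_one]
    omega
  · intro k h1 h2
    simp only [List.getElem_map, PySem.List.getElem_pyRange_one]
    simp only [List.length_map, PySem.List.length_pyRange_one] at h1
    by_cases hk : k < (PySem.List.pyRange 1 (n + 1) 1).length
    · rw [List.getElem_append_left hk, PySem.List.getElem_pyRange_one]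
      rw [PySem.List.length_pyRange_one] at hk
      have hlen : (PySem.List.pyRange 1 (n + 1) 1).length = (n + 1 - 1).toNat :=
        PySem.List.length_pyRange_one 1 (n + 1)
      rw [abs_of_nonneg (by omega)]
      omega
    · rw [List.getElem_append_right (not_lt.mp hk)]
      simp only [PySem.List.pyRange_neg_one, List.getElem_map, List.getElem_range,
        PySem.List.length_pyRange_one] at *
      have hlen : (PySem.List.pyRange 1 (n + 1) 1).length = (n + 1 - 1).toNat :=
        PySem.List.length_pyRange_one 1 (n + 1)
      rw [abs_of_nonpos (by omega)]
      omega

-- ===== VERDICT (by name: the statement is the Claim_ definition above) =====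
theorem star_rhombus_spec : Claim_equal_star_rhombus := by
  intro n _
  unfold Spec_star_rhombus star_rhombus_alt
  rw [star_rhombus_chars, ← widths_eq, List.flatMap_def, List.map_map]
  rfl
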